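-- pv_equiv track=rewrite | github.com/pypi-data/pypi-mirror-185 | packages/FairNLP/FairNLP-5.1.0.tar.gz/FairNLP-5.1.0/FNLP/URL/__init__.py | extract_siteName_two_periods
-- ===== SOURCE A (Python) =====
-- def extract_siteName_two_periods(url):
--     """ PRIVATE """
--     if type(url) not in [str]:
--         return False
--     temp = ""
--     start = 0
--     end = 0
--     i = 0
--     periodCount = 0
--     lastChar = ''
--     # -> Part 1
--     for char in url:
--         if char == '/' and lastChar == '/':
--             start = i + 1
--         if char == '.':
--             periodCount += 1
--             if periodCount == 2:
--                 end = i
--         if end > 0: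
--             temp = url[start:end]
--             break
--         lastChar = char
--         i += 1
--     # -> Part 2
--     n = 0
--     match = ""
--     for c in temp:
--         if c == '.':
--             match = temp[n + 1:]
--         n += 1
--     return match
-- ===== SOURCE B (Python) =====
-- def extract_siteName_two_periods(url):
--     """ PRIVATE """
--     if type(url) not in [str]:
--         return False
--     p1 = url.find('.')
--     if p1 == -1:
--         return ""
--     p2 = url.find('.', p1 + 1)
--     if p2 == -1:
--         return ""
--     mid = url[p1 + 1:p2]
--     return "" if "//" in mid else mid
-- ===== Notes on version B (the rewrite author's own statement) =====
-- stated objective: simpler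
-- what changed: A's stateful character scan (tracking start/end/periodCount/lastChar) followed by a second scan for the last period is replaced by direct index search: find the first two periods, slice the text between them, and return it unless it contains '//'. (same O(n) but measured faster: the work moves from a per-character Python loop into str.find/in slicing)
import Mathlib
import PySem

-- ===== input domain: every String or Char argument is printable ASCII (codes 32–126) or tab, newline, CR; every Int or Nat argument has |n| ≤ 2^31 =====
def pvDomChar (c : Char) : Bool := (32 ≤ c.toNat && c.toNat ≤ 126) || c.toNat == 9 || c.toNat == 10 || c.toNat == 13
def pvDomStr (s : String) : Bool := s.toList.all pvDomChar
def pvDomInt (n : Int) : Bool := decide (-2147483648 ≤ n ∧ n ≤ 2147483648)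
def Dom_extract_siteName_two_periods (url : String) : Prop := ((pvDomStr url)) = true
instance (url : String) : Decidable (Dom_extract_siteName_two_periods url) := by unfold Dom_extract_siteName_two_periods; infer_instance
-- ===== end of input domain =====

-- B replaces A's two character-scanning loops (stateful '//'-and-period scan, then a second scan
-- for the last period) by direct index search: find the first two periods, take the text between
-- them, and return it unless it contains '//'; objective: simpler. (Total for str input.)

-- ===== PORT A =====
-- Part 1 of A: the scan with start/end/periodCount/lastChar state, breaking when end > 0.
def pvLoopA (url : List Char) : List Char → List Char → Int → Int → Int → Int → Option Char → List Char
  | [], temp, _, _, _, _, _ => temp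
  | c :: cs, temp, start, e, i, pc, lastC =>
    let start1 := if c = '/' ∧ lastC = some '/' then i + 1 else start
    let pc1 := if c = '.' then pc + 1 else pc
    let e1 := if c = '.' ∧ pc1 = 2 then i else e
    if 0 < e1 then PySem.List.slice url (some start1) (some e1)
    else pvLoopA url cs temp start1 e1 (i + 1) pc1 (some c)

-- Part 2 of A: match = temp[n+1:] for each '.' seen at index n.
def pvLoop2 (temp : List Char) : List Char → Int → List Char → List Char
  | [], _, m => m
  | c :: cs, n, m =>
    pvLoop2 temp cs (n + 1) (if c = '.' then PySem.List.slice temp (some (n + 1)) none else m)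

def extract_siteName_two_periods (url : String) : String :=
  let temp := pvLoopA url.toList url.toList [] 0 0 0 0 none
  String.ofList (pvLoop2 temp temp 0 [])

-- ===== PORT B =====
def extract_siteName_two_periods_alt (url : String) : String :=
  let p1 := PySem.Str.find url "."
  if p1 = -1 then "" else
  let p2 := PySem.Str.findFrom url "." (p1 + 1) none
  if p2 = -1 then "" else
  let mid := PySem.Str.slice url (some (p1 + 1)) (some p2)
  if PySem.Str.isIn "//" mid then "" else mid

-- ===== PRECONDITION & SPEC =====
def Spec_extract_siteName_two_periods (url : String) (out : String) : Prop := out = extract_siteName_two_periods_alt url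
instance (url : String) (out : String) : Decidable (Spec_extract_siteName_two_periods url out) := by unfold Spec_extract_siteName_two_periods; infer_instance

-- ===== CLAIM (what is proved, stated in full; the proofs are below) =====
def Claim_equal_extract_siteName_two_periods : Prop := ∀ (url : String), Dom_extract_siteName_two_periods url → Spec_extract_siteName_two_periods url (extract_siteName_two_periods url)

-- ===== LEMMAS AND PROOFS =====

-- relative index of the period that makes periodCount reach 2 (pc = periods already seen)
def pvSd (pc : Nat) : List Char → Option Nat
  | [] => none
  | c :: cs =>
    if c = '.' then (if pc = 1 then some 0 else (pvSd (pc + 1) cs).map (· + 1))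
    else (pvSd pc cs).map (· + 1)

-- the 'start' value A's scan ends with: 1 + index of the last second '/' of a "//", else acc
def pvDs : List Char → Option Char → Nat → Nat → Nat
  | [], _, _, acc => acc
  | c :: cs, lastC, i, acc =>
    pvDs cs (some c) (i + 1) (if c = '/' ∧ lastC = some '/' then i + 1 else acc)

def pvLastOf : List Char → Option Char → Option Char
  | [], lc => lc
  | c :: cs, _ => pvLastOf cs (some c)

lemma sd_none : ∀ (l : List Char) (pc : Nat), '.' ∉ l → pvSd pc l = none := by
  intro l
  induction l with
  | nil => intro pc h; rfl
  | cons c cs ih =>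
    intro pc h
    simp only [List.mem_cons, not_or] at h
    simp [pvSd, Ne.symm h.1, ih _ h.2]

lemma sd_one : ∀ (m r : List Char), '.' ∉ m → pvSd 1 (m ++ '.' :: r) = some m.length := by
  intro m
  induction m with
  | nil => intro r h; simp [pvSd]
  | cons c cs ih =>
    intro r h
    simp only [List.mem_cons, not_or] at h
    simp [pvSd, Ne.symm h.1, ih _ h.2]

lemma sd_zero : ∀ (a b : List Char), '.' ∉ a →
    pvSd 0 (a ++ '.' :: b) = (pvSd 1 b).map (· + (a.length + 1)) := by
  intro a
  induction a with
  | nil =>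
    intro b h
    simp [pvSd]
  | cons c cs ih =>
    intro b h
    simp only [List.mem_cons, not_or] at h
    simp only [List.cons_append, pvSd, Ne.symm h.1, if_false, ih _ h.2, Option.map_map]
    cases pvSd 1 b <;> simp

lemma ds_append : ∀ (x y : List Char) (lastC : Option Char) (i acc : Nat),
    pvDs (x ++ y) lastC i acc = pvDs y (pvLastOf x lastC) (i + x.length) (pvDs x lastC i acc) := by
  intro x
  induction x with
  | nil => intro y lastC i acc; simp [pvDs, pvLastOf]
  | cons c cs ih =>
    intro y lastC i acc
    simp only [List.cons_append, pvDs, pvLastOf, ih, List.length_cons]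
    congr 1
    omega

lemma ds_le : ∀ (x : List Char) (lastC : Option Char) (i acc : Nat),
    acc ≤ i → pvDs x lastC i acc ≤ i + x.length := by
  intro x
  induction x with
  | nil => intro lastC i acc h; simpa [pvDs]
  | cons c cs ih =>
    intro lastC i acc h
    simp only [pvDs, List.length_cons]
    have := ih (some c) (i + 1) (if c = '/' ∧ lastC = some '/' then i + 1 else acc)
      (by split <;> omega)
    omega

lemma ds_lb : ∀ (x : List Char) (lastC : Option Char) (i acc : Nat),
    pvDs x lastC i acc = acc ∨ i < pvDs x lastC i acc := by
  intro x
  induction x with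
  | nil => intro lastC i acc; left; rfl
  | cons c cs ih =>
    intro lastC i acc
    simp only [pvDs]
    rcases ih (some c) (i + 1) (if c = '/' ∧ lastC = some '/' then i + 1 else acc) with h | h
    · rw [h]; split <;> omega
    · right; omega

lemma ds_no_pair : ∀ (x : List Char) (lastC : Option Char) (i acc : Nat),
    ¬ ['/', '/'] <:+: ((if lastC = some '/' then ['/'] else []) ++ x) →
    pvDs x lastC i acc = acc := by
  intro x
  induction x with
  | nil => intro lastC i acc h; rfl
  | cons c cs ih =>
    intro lastC i acc h
    have hnot : ¬ (c = '/' ∧ lastC = some '/') := by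
      rintro ⟨rfl, rfl⟩
      apply h
      rw [if_pos rfl]
      exact ⟨[], cs, rfl⟩
    have hsub : ((if some c = some '/' then ['/'] else []) ++ cs) <:+:
        ((if lastC = some '/' then ['/'] else []) ++ c :: cs) := by
      by_cases hc : c = '/'
      · subst hc
        rw [if_pos rfl]
        exact (List.suffix_append _ ('/' :: cs)).isInfix
      · rw [if_neg (by simpa using hc), List.nil_append]
        exact (List.infix_cons (List.infix_refl cs)).trans
          (List.suffix_append _ _).isInfix
    simp only [pvDs, if_neg hnot]
    exact ih (some c) (i + 1) acc (fun hin => h (hin.trans hsub))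

lemma ds_pair : ∀ (x : List Char) (lastC : Option Char) (i acc : Nat),
    ['/', '/'] <:+: x → i + 1 ≤ pvDs x lastC i acc := by
  intro x
  induction x with
  | nil => intro lastC i acc h; simp at h
  | cons c cs ih =>
    intro lastC i acc h
    rcases List.infix_cons_iff.mp h with hp | hi
    · obtain ⟨hc, hp2⟩ := List.cons_prefix_cons.mp hp
      obtain ⟨t, ht⟩ := hp2
      subst hc
      subst ht
      simp only [List.singleton_append, pvDs, and_true, reduceIte]
      rcases ds_lb t (some '/') (i + 1 + 1) (i + 1 + 1) with h' | h' <;> omega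
    · simp only [pvDs]
      have := ih (some c) (i + 1) (if c = '/' ∧ lastC = some '/' then i + 1 else acc) hi
      omega

lemma loopA_eq (url : List Char) : ∀ (rest temp : List Char) (start i pc : Nat) (lastC : Option Char),
    pc ≤ 1 → (pc = 1 → 1 ≤ i) →
    pvLoopA url rest temp (start : Int) 0 (i : Int) (pc : Int) lastC =
      match pvSd pc rest with
      | none => temp
      | some j => PySem.List.slice url (some ((pvDs (rest.take j) lastC i start : Nat) : Int))
                    (some (((i + j : Nat) : Int))) := by
  intro rest
  induction rest with
  | nil => intro temp start i pc lastC _ _; rfl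
  | cons c cs ih =>
    intro temp start i pc lastC hpc hpi
    by_cases hc : c = '.'
    · subst hc
      by_cases h1 : pc = 1
      · subst h1
        have hi : 1 ≤ i := hpi rfl
        have hi' : 0 < i := hi
        simp [pvLoopA, pvSd, hi', pvDs]
      · have h0 : pc = 0 := by omega
        subst h0
        have step : pvLoopA url ('.' :: cs) temp (start : Int) 0 (i : Int) ((0 : Nat) : Int) lastC =
            pvLoopA url cs temp (start : Int) 0 ((i + 1 : Nat) : Int) ((1 : Nat) : Int)
              (some '.') := by
          simp [pvLoopA]
        rw [step, ih temp start (i + 1) 1 (some '.') (by omega) (fun _ => by omega)]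
        simp only [pvSd, reduceIte]
        cases hsd : pvSd 1 cs with
        | none => simp
        | some j' =>
          norm_num
          have hds : pvDs ('.' :: cs.take j') lastC i start =
              pvDs (cs.take j') (some '.') (i + 1) start := by
            simp [pvDs]
          rw [hds]
          congr 2
          ring
    · have step : pvLoopA url (c :: cs) temp (start : Int) 0 (i : Int) (pc : Int) lastC =
          pvLoopA url cs temp
            (((if c = '/' ∧ lastC = some '/' then i + 1 else start : Nat) : Int)) 0
            ((i + 1 : Nat) : Int) (pc : Int) (some c) := by
        simp [pvLoopA, hc, apply_ite (fun n : Nat => (n : Int))]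
      rw [step, ih temp _ (i + 1) pc (some c) hpc (fun h => by omega)]
      simp only [pvSd, if_neg hc]
      cases hsd : pvSd pc cs with
      | none => simp
      | some j' =>
        simp only [Option.map_some]
        have htake : (c :: cs).take (j' + 1) = c :: cs.take j' := rfl
        rw [htake]
        have hds : pvDs (c :: cs.take j') lastC i start =
            pvDs (cs.take j') (some c) (i + 1)
              (if c = '/' ∧ lastC = some '/' then i + 1 else start) := rfl
        rw [hds]
        congr 2
        omega

lemma loop2_no_dot (temp : List Char) : ∀ (rest : List Char) (n : Int) (m : List Char),
    '.' ∉ rest → pvLoop2 temp rest n m = m := by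
  intro rest
  induction rest with
  | nil => intro n m h; rfl
  | cons c cs ih =>
    intro n m h
    simp only [List.mem_cons, not_or] at h
    simp [pvLoop2, Ne.symm h.1, ih _ _ h.2]

lemma loop2_last (temp : List Char) : ∀ (x y : List Char) (k : Nat) (m : List Char),
    temp.drop k = x ++ '.' :: y → '.' ∉ y →
    pvLoop2 temp (x ++ '.' :: y) (k : Int) m = y := by
  intro x
  induction x with
  | nil =>
    intro y k m hdrop hy
    have h1 : (k : Int) + 1 = ((k + 1 : Nat) : Int) := by push_cast; ring
    have h2 : temp.drop (k + 1) = y := by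
      rw [← List.drop_drop] -- careful with order
      rw [hdrop]
      rfl
    simp only [List.nil_append, pvLoop2, h1,
      PySem.List.slice_from_natCast, h2]
    exact loop2_no_dot temp y _ _ hy
  | cons c cs ih =>
    intro y k m hdrop hy
    have h1 : (k : Int) + 1 = ((k + 1 : Nat) : Int) := by push_cast; ring
    have h2 : temp.drop (k + 1) = cs ++ '.' :: y := by
      rw [← List.drop_drop, hdrop]
      rfl
    simp only [List.cons_append, pvLoop2, h1]
    exact ih y (k + 1) _ h2 hy

lemma find_first_dot : ∀ (a b : List Char), '.' ∉ a →
    PySem.Chars.find (a ++ '.' :: b) ['.'] = (a.length : Int) := by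
  intro a b ha
  set l := a ++ '.' :: b with hl
  have hmem : ['.'] <:+: l := (List.singleton_infix_iff _ _).mpr (by simp [hl])
  have hne : PySem.Chars.find l ['.'] ≠ -1 := (PySem.Chars.find_ne_neg_one_iff _ _).mpr hmem
  have hge0 : 0 ≤ PySem.Chars.find l ['.'] := by
    have := PySem.Chars.neg_one_le_find l ['.']
    omega
  obtain ⟨hpre, hmin⟩ := PySem.Chars.find_spec hge0
  have hle : (PySem.Chars.find l ['.']).toNat ≤ a.length := by
    by_contra hgt
    exact hmin a.length (by omega) (by rw [hl, List.drop_left]; exact ⟨b, rfl⟩)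
  have hnlt : ¬ (PySem.Chars.find l ['.']).toNat < a.length := by
    intro hlt
    rw [hl, List.drop_append_of_le_length (by omega),
      List.drop_eq_getElem_cons hlt] at hpre
    have := (List.cons_prefix_cons.mp hpre).1
    exact ha (this ▸ List.getElem_mem hlt)
  omega

lemma first_split : ∀ (l : List Char), '.' ∈ l → ∃ a b, l = a ++ '.' :: b ∧ '.' ∉ a := by
  intro l
  induction l with
  | nil => intro h; simp at h
  | cons c cs ih =>
    intro h
    by_cases hc : c = '.'
    · exact ⟨[], cs, by simp [hc], by simp⟩
    · have : '.' ∈ cs := by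
        rcases List.mem_cons.mp h with h1 | h1
        · exact absurd h1.symm hc
        · exact h1
      obtain ⟨a, b, rfl, ha⟩ := ih this
      exact ⟨c :: a, b, rfl, by simp only [List.mem_cons, not_or]; exact ⟨fun h => hc h.symm, ha⟩⟩

lemma main_eq (url : String) :
    extract_siteName_two_periods url = extract_siteName_two_periods_alt url := by
  have hA := loopA_eq url.toList url.toList [] 0 0 0 none (by omega) (by omega)
  simp only [Nat.cast_zero] at hA
  by_cases h1 : '.' ∈ url.toList
  · obtain ⟨a, b, hlab, ha⟩ := first_split url.toList h1
    have hp1 : PySem.Chars.find url.toList ['.'] = (a.length : Int) := by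
      rw [hlab]; exact find_first_dot a b ha
    have hp1' : PySem.Str.find url "." = (a.length : Int) := by
      simp only [PySem.Str.find_eq, show ("." : String).toList = ['.'] from rfl, hp1]
    have hdrop : url.toList.drop (a.length + 1) = b := by
      rw [hlab, show a ++ '.' :: b = (a ++ ['.']) ++ b by simp]
      simp
    have hfindFrom : PySem.Str.findFrom url "." (PySem.Str.find url "." + 1) none =
        if PySem.Chars.find b ['.'] = -1 then -1
        else ((a.length + 1 : Nat) : Int) + PySem.Chars.find b ['.'] := by
      have hcast : PySem.Str.find url "." + 1 = ((a.length + 1 : Nat) : Int) := by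
        rw [hp1']; push_cast; ring
      rw [hcast]
      simp only [PySem.Str.findFrom_eq, show ("." : String).toList = ['.'] from rfl]
      rw [PySem.Chars.findFrom_natCast url.toList ['.'] (a.length + 1)
        (by rw [hlab]; simp), hdrop]
    by_cases h2 : '.' ∈ b
    · obtain ⟨m, r, hbmr, hm⟩ := first_split b h2
      have hfb : PySem.Chars.find b ['.'] = (m.length : Int) := by
        rw [hbmr]; exact find_first_dot m r hm
      have hp2 : PySem.Str.findFrom url "." (PySem.Str.find url "." + 1) none =
          ((a.length + 1 + m.length : Nat) : Int) := by
        rw [hfindFrom, if_neg (by rw [hfb]; omega), hfb]; push_cast; ring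
      have hmid : (PySem.Str.slice url (some ((a.length : Int) + 1))
          (some ((a.length + 1 + m.length : Nat) : Int))).toList = m := by
        rw [show ((a.length : Int) + 1) = ((a.length + 1 : Nat) : Int) by push_cast; ring]
        simp only [PySem.Str.toList_slice, PySem.Chars.slice_eq_listSlice,
          PySem.List.slice_natCast]
        rw [hdrop, show a.length + 1 + m.length - (a.length + 1) = m.length by omega, hbmr]
        simp
      -- A side
      have hsd : pvSd 0 url.toList = some (m.length + (a.length + 1)) := by
        rw [hlab, sd_zero a b ha, hbmr, sd_one m r hm]; rfl
      have htake : url.toList.take (m.length + (a.length + 1)) = a ++ '.' :: m := by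
        rw [hlab, hbmr, show a ++ '.' :: (m ++ '.' :: r) = (a ++ '.' :: m) ++ '.' :: r by
          simp, show m.length + (a.length + 1) = (a ++ '.' :: m).length by simp; omega]
        exact List.take_left
      have hsa_le : pvDs a none 0 0 ≤ a.length := by
        simpa using ds_le a none 0 0 (le_refl 0)
      have hsplit : pvDs (a ++ '.' :: m) none 0 0 =
          pvDs m (some '.') (a.length + 1) (pvDs a none 0 0) := by
        rw [ds_append]
        simp [pvDs]
      have hA' : pvLoopA url.toList url.toList [] 0 0 0 0 none =
          PySem.List.slice url.toList
            (some ((pvDs m (some '.') (a.length + 1) (pvDs a none 0 0) : Nat) : Int))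
            (some ((0 + (m.length + (a.length + 1)) : Nat) : Int)) := by
        rw [hA, hsd]
        show PySem.List.slice url.toList
          (some ((pvDs (url.toList.take (m.length + (a.length + 1))) none 0 0 : Nat) : Int))
          (some ((0 + (m.length + (a.length + 1)) : Nat) : Int)) = _
        rw [htake, hsplit]
      by_cases hinf : ['/', '/'] <:+: m
      · -- temp lies inside m: no period, A returns "", and '//' ∈ mid so B returns ""
        have hs_lb : a.length + 1 + 1 ≤ pvDs m (some '.') (a.length + 1) (pvDs a none 0 0) :=
          ds_pair m (some '.') (a.length + 1) (pvDs a none 0 0) hinf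
        have hnod : '.' ∉ PySem.List.slice url.toList
            (some ((pvDs m (some '.') (a.length + 1) (pvDs a none 0 0) : Nat) : Int))
            (some ((0 + (m.length + (a.length + 1)) : Nat) : Int)) := by
          rw [PySem.List.slice_natCast]
          set sv := pvDs m (some '.') (a.length + 1) (pvDs a none 0 0) with hsv
          have hdrop2 : url.toList.drop sv = (m ++ '.' :: r).drop (sv - (a.length + 1)) := by
            conv_lhs => rw [hlab, hbmr, show a ++ '.' :: (m ++ '.' :: r) =
              (a ++ ['.']) ++ (m ++ '.' :: r) by simp,
              show sv = (a ++ ['.']).length + (sv - (a.length + 1)) by simp; omega]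
            exact List.drop_length_add_append _
          rw [hdrop2]
          by_cases hd : sv - (a.length + 1) ≤ m.length
          · rw [List.drop_append_of_le_length hd,
              show 0 + (m.length + (a.length + 1)) - sv = m.length - (sv - (a.length + 1))
                by omega,
              List.take_append_of_le_length (by simp)]
            intro hmem
            exact hm (List.mem_of_mem_drop (List.mem_of_mem_take hmem))
          · rw [show 0 + (m.length + (a.length + 1)) - sv = 0 by omega]
            simp
        have hloop := loop2_no_dot (PySem.List.slice url.toList
            (some ((pvDs m (some '.') (a.length + 1) (pvDs a none 0 0) : Nat) : Int))
            (some ((0 + (m.length + (a.length + 1)) : Nat) : Int))) (PySem.List.slice url.toList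
            (some ((pvDs m (some '.') (a.length + 1) (pvDs a none 0 0) : Nat) : Int))
            (some ((0 + (m.length + (a.length + 1)) : Nat) : Int))) 0 [] hnod
        have hisIn : PySem.Str.isIn "//" (PySem.Str.slice url (some ((a.length : Int) + 1))
            (some ((a.length + 1 + m.length : Nat) : Int))) = true := by
          rw [PySem.Str.isIn_eq, hmid]
          exact (PySem.Chars.isIn_iff_infix _ _).mpr
            (by rw [show ("//" : String).toList = ['/', '/'] from rfl]; exact hinf)
        simp only [extract_siteName_two_periods, extract_siteName_two_periods_alt]
        rw [hA', hloop, hp2, hp1', if_neg (by omega : ¬ ((a.length : Int)) = -1),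
          if_neg (by push_cast; omega : ¬ (((a.length + 1 + m.length : Nat) : Int)) = -1),
          hisIn]
        rfl
      · -- temp = a[start:] ++ '.' ++ m: A returns m, no '//' in mid so B returns mid = m
        have hs_eq : pvDs m (some '.') (a.length + 1) (pvDs a none 0 0) = pvDs a none 0 0 :=
          ds_no_pair m (some '.') (a.length + 1) (pvDs a none 0 0) (by simpa using hinf)
        rw [hs_eq] at hA'
        have htemp : PySem.List.slice url.toList (some ((pvDs a none 0 0 : Nat) : Int))
            (some ((0 + (m.length + (a.length + 1)) : Nat) : Int)) =
            a.drop (pvDs a none 0 0) ++ '.' :: m := by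
          rw [PySem.List.slice_natCast, hlab, hbmr,
            List.drop_append_of_le_length hsa_le,
            show 0 + (m.length + (a.length + 1)) - pvDs a none 0 0 =
              (a.drop (pvDs a none 0 0)).length + (1 + m.length) by simp; omega,
            List.take_length_add_append]
          congr 1
          show ('.' :: (m ++ '.' :: r)).take (1 + m.length) = '.' :: m
          rw [show (1 + m.length) = m.length + 1 by omega]
          simp only [List.take_succ_cons]
          congr 1
          simp
        rw [htemp] at hA'
        have hloop := loop2_last (a.drop (pvDs a none 0 0) ++ '.' :: m)
          (a.drop (pvDs a none 0 0)) m 0 [] (by simp) hm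
        simp only [Nat.cast_zero] at hloop
        have hisIn : PySem.Str.isIn "//" (PySem.Str.slice url (some ((a.length : Int) + 1))
            (some ((a.length + 1 + m.length : Nat) : Int))) = false := by
          rw [PySem.Str.isIn_eq, hmid]
          exact (PySem.Chars.isIn_eq_false_iff _ _).mpr
            (by rw [show ("//" : String).toList = ['/', '/'] from rfl]; exact hinf)
        simp only [extract_siteName_two_periods, extract_siteName_two_periods_alt]
        rw [hA', hloop, hp2, hp1', if_neg (by omega : ¬ ((a.length : Int)) = -1),
          if_neg (by push_cast; omega : ¬ (((a.length + 1 + m.length : Nat) : Int)) = -1),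
          hisIn]
        simp only [Bool.false_eq_true, if_false]
        rw [show PySem.Str.slice url (some ((a.length : Int) + 1))
          (some ((a.length + 1 + m.length : Nat) : Int)) = String.ofList m from by
          conv_rhs => rw [← hmid]
          exact String.ofList_toList.symm]
    · -- exactly one period: both return ""
      have hfb : PySem.Chars.find b ['.'] = -1 :=
        (PySem.Chars.find_eq_neg_one_iff _ _).mpr
          (fun hin => h2 ((List.singleton_infix_iff _ _).mp hin))
      have hB : PySem.Str.findFrom url "." (PySem.Str.find url "." + 1) none = -1 := by
        rw [hfindFrom, if_pos hfb]
      have hsd : pvSd 0 url.toList = none := by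
        rw [hlab, sd_zero a b ha, sd_none b 1 h2]; rfl
      have hA' : pvLoopA url.toList url.toList [] 0 0 0 0 none = [] := by rw [hA, hsd]
      simp only [extract_siteName_two_periods, extract_siteName_two_periods_alt]
      rw [hA', hB, hp1', if_neg (by omega : ¬ ((a.length : Int)) = -1), if_pos rfl]
      rfl
  · -- no period at all: both return ""
    have hsd : pvSd 0 url.toList = none := sd_none url.toList 0 h1
    have hA' : pvLoopA url.toList url.toList [] 0 0 0 0 none = [] := by rw [hA, hsd]
    have hf : PySem.Str.find url "." = -1 := by
      simp only [PySem.Str.find_eq, show ("." : String).toList = ['.'] from rfl]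
      exact (PySem.Chars.find_eq_neg_one_iff _ _).mpr
        (fun hin => h1 ((List.singleton_infix_iff _ _).mp hin))
    simp only [extract_siteName_two_periods, extract_siteName_two_periods_alt]
    rw [hA', hf, if_pos rfl]
    rfl

-- ===== VERDICT (by name: the statement is the Claim_ definition above) =====
theorem extract_siteName_two_periods_spec : Claim_equal_extract_siteName_two_periods := by
  intro url _
  exact main_eq url
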